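-- pv_equiv track=rewrite | github.com/Heme98/AdventOfCode2025 | Day03/main.py | get_highest_joltage
-- ===== SOURCE A (Python) =====
-- def get_highest_joltage(banks: str, number_of_batteries: int) -> str:
--     highest_joltage = 0
--     for bank in banks:
--         stack = []
--         allowed_skips = len(bank) - number_of_batteries
--         for battery_joltage in bank:
--             while stack and stack[-1] < battery_joltage and allowed_skips > 0:
--                 stack.pop()
--                 allowed_skips -= 1
--             stack.append(battery_joltage)
--         highest_joltage += (int("".join(stack[:number_of_batteries])))
--     return highest_joltage
-- ===== SOURCE B (Python) =====
-- def get_highest_joltage(banks, number_of_batteries):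
--     total = 0
--     for bank in banks:
--         k = min(number_of_batteries, len(bank))
--         chosen = []
--         rest = bank
--         while len(chosen) < k:
--             window = rest[: len(rest) - (k - len(chosen) - 1)]
--             best = max(window)
--             pos = window.index(best)
--             chosen.append(best)
--             rest = rest[pos + 1:]
--         total += int("".join(chosen))
--     return total
-- ===== Notes on version B (the rewrite author's own statement) =====
-- stated objective: alternative
-- what changed: Per bank, the monotonic stack with a shared skip budget is replaced by greedy window-maximum selection: repeatedly take the leftmost maximum of the window that still leaves enough characters for the remaining picks, then continue in the suffix after it.
-- outside the precondition, e.g. on get_highest_joltage(['321'], -1): A returns 32, B raises ValueError; on get_highest_joltage(['+5'], 2): A returns 5, B returns 5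
import Mathlib
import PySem

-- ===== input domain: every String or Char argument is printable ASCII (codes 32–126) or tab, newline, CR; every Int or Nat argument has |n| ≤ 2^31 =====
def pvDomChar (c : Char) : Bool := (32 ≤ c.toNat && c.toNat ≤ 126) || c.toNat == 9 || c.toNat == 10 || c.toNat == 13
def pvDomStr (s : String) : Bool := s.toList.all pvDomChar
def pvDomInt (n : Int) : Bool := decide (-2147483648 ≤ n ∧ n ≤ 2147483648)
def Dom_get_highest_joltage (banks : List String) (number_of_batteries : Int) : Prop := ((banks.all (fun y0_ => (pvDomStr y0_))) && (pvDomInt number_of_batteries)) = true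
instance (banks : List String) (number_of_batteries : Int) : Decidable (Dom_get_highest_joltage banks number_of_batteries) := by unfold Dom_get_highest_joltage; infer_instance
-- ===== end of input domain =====

-- B replaces A's monotonic-stack pass by greedy leftmost-window-maximum selection (alternative algorithm, similar cost).

-- ===== PORT A =====
-- the inner while loop: pop while stack nonempty, top < c and skips > 0 (stack kept top-first; A appends at the end, so the final stack is reversed)
def pvPopA : List Char → Int → Char → List Char × Int
  | [], sk, _ => ([], sk)
  | h :: t, sk, c => if h < c ∧ 0 < sk then pvPopA t (sk - 1) c else (h :: t, sk)

-- the inner for loop over the bank's characters; returns the final stack bottom-first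
def pvRunA : List Char → Int → List Char → List Char
  | st, _, [] => st.reverse
  | st, sk, c :: cs => pvRunA (c :: (pvPopA st sk c).1) (pvPopA st sk c).2 cs

-- int("".join(stack[:number_of_batteries])); int() raising ValueError is excluded by Pre_ (getD 0 is never reached there)
def pvBankA (bank : String) (k : Int) : Int :=
  (PySem.Int.ofChars? (PySem.List.slice (pvRunA [] ((bank.toList.length : Int) - k) bank.toList) none (some k))).getD 0

def get_highest_joltage (banks : List String) (number_of_batteries : Int) : Int :=
  banks.foldl (fun acc bank => acc + pvBankA bank number_of_batteries) 0

-- ===== PORT B =====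
-- the while loop of Source B, recursion on need = k - len(chosen); max()/.index() raising on an empty window is excluded by Pre_
def pvChooseB : List Char → Nat → List Char
  | _, 0 => []
  | rest, n + 1 =>
      let window := PySem.List.slice rest none (some ((rest.length : Int) - (n : Int)))
      let best := (PySem.List.max? window (fun x => x)).getD ' '
      let pos := (PySem.List.index? window best).getD 0
      best :: pvChooseB (rest.drop (pos + 1)) n

def pvBankB (bank : String) (k : Int) : Int :=
  (PySem.Int.ofChars? (pvChooseB bank.toList (min k (bank.toList.length : Int)).toNat)).getD 0

def get_highest_joltage_alt (banks : List String) (number_of_batteries : Int) : Int :=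
  banks.foldl (fun acc bank => acc + pvBankB bank number_of_batteries) 0

-- ===== PRECONDITION & SPEC =====
-- Pre_ restricts to the natural domain — no banks at all, or a positive battery count with every bank made of digits and
-- spaces, holding a digit and no space between digits (so the selected substring always parses): outside it int() raises
-- ValueError on most inputs, and the remaining inputs where A still returns — otherwise-decorated numerals int() happens to
-- parse, or a negative count hitting Python's negative-slice rule stack[:k] — are artefacts of int() parsing and slicing.
def Pre_get_highest_joltage (banks : List String) (number_of_batteries : Int) : Prop :=
  banks = [] ∨
    (1 ≤ number_of_batteries ∧
      (banks.all (fun b =>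
        b.toList.any (fun c => decide ('0' ≤ c) && decide (c ≤ '9'))
        && b.toList.all (fun c => (decide ('0' ≤ c) && decide (c ≤ '9')) || decide (c = ' '))
        && !((PySem.Chars.strip b.toList).any (fun c => decide (c = ' '))))) = true)
instance (banks : List String) (number_of_batteries : Int) : Decidable (Pre_get_highest_joltage banks number_of_batteries) := by unfold Pre_get_highest_joltage; infer_instance

def pvWitness_get_highest_joltage : List String × Int := (["935", "21"], 2)

def Spec_get_highest_joltage (banks : List String) (number_of_batteries : Int) (out : Int) : Prop := out = get_highest_joltage_alt banks number_of_batteries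
instance (banks : List String) (number_of_batteries : Int) (out : Int) : Decidable (Spec_get_highest_joltage banks number_of_batteries out) := by unfold Spec_get_highest_joltage; infer_instance

-- ===== CLAIM (what is proved, stated in full; the proofs are below) =====
def Claim_equal_get_highest_joltage : Prop := ∀ (banks : List String) (number_of_batteries : Int), Dom_get_highest_joltage banks number_of_batteries → Pre_get_highest_joltage banks number_of_batteries → Spec_get_highest_joltage banks number_of_batteries (get_highest_joltage banks number_of_batteries)

-- ===== LEMMAS AND PROOFS =====

-- state after A's inner for loop (stack top-first, remaining skips), for reasoning about intermediate states
def pvState : List Char → Int → List Char → List Char × Int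
  | st, sk, [] => (st, sk)
  | st, sk, c :: cs => pvState (c :: (pvPopA st sk c).1) (pvPopA st sk c).2 cs

theorem pvRunA_eq_state : ∀ (xs st : List Char) (sk : Int),
    pvRunA st sk xs = (pvState st sk xs).1.reverse := by
  intro xs
  induction xs with
  | nil => intro st sk; simp [pvRunA, pvState]
  | cons c cs ih => intro st sk; simp [pvRunA, pvState, ih]

theorem pvState_append : ∀ (xs ys st : List Char) (sk : Int),
    pvState st sk (xs ++ ys) = pvState (pvState st sk xs).1 (pvState st sk xs).2 ys := by
  intro xs
  induction xs with
  | nil => intro ys st sk; simp [pvState]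
  | cons c cs ih => intro ys st sk; simp [pvState, ih]

theorem pvPopA_sub : ∀ (st : List Char) (sk : Int) (c x : Char),
    x ∈ (pvPopA st sk c).1 → x ∈ st := by
  intro st
  induction st with
  | nil => intro sk c x h; simpa [pvPopA] using h
  | cons h t ih =>
    intro sk c x hx
    by_cases hc : h < c ∧ 0 < sk
    · simp only [pvPopA, if_pos hc] at hx
      exact List.mem_cons_of_mem _ (ih _ _ _ hx)
    · simp only [pvPopA, if_neg hc] at hx
      exact hx

theorem pvPopA_len : ∀ (st : List Char) (sk : Int) (c : Char),
    ((pvPopA st sk c).1.length : Int) - (pvPopA st sk c).2 = (st.length : Int) - sk := by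
  intro st
  induction st with
  | nil => intro sk c; simp [pvPopA]
  | cons h t ih =>
    intro sk c
    by_cases hc : h < c ∧ 0 < sk
    · simp only [pvPopA, if_pos hc]
      have := ih (sk - 1) c
      simp only [List.length_cons]
      push_cast
      omega
    · simp [pvPopA, if_neg hc]

theorem pvPopA_all : ∀ (st : List Char) (sk : Int) (c : Char),
    (∀ x ∈ st, x < c) → (st.length : Int) ≤ sk → pvPopA st sk c = ([], sk - st.length) := by
  intro st
  induction st with
  | nil => intro sk c _ _; simp [pvPopA]
  | cons h t ih =>
    intro sk c hlt hle
    simp only [List.length_cons] at hle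
    have hc : h < c ∧ 0 < sk := by
      refine ⟨hlt h (by simp), ?_⟩
      have : (0:Int) ≤ t.length := by positivity
      omega
    simp only [pvPopA, if_pos hc]
    rw [ih (sk - 1) c (fun x hx => hlt x (List.mem_cons_of_mem _ hx)) (by push_cast at hle ⊢; omega)]
    simp only [List.length_cons]
    push_cast
    ring_nf

-- invariant of the run over a prefix of characters all smaller than c:
-- the stack stays smaller than c, and (stack length − skips) grows by exactly the number of characters consumed
theorem pvState_small (c : Char) : ∀ (pre st : List Char) (sk : Int),
    (∀ x ∈ pre, x < c) → (∀ x ∈ st, x < c) →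
    (∀ x ∈ (pvState st sk pre).1, x < c) ∧
      ((pvState st sk pre).1.length : Int) - (pvState st sk pre).2 = (st.length : Int) - sk + pre.length := by
  intro pre
  induction pre with
  | nil => intro st sk _ hst; exact ⟨by simpa [pvState] using hst, by simp [pvState]⟩
  | cons a pre' ih =>
    intro st sk hpre hst
    have ha : a < c := hpre a (by simp)
    have hpre' : ∀ x ∈ pre', x < c := fun x hx => hpre x (List.mem_cons_of_mem _ hx)
    have hst' : ∀ x ∈ a :: (pvPopA st sk a).1, x < c := by
      intro x hx
      rcases List.mem_cons.1 hx with h | h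
      · exact h ▸ ha
      · exact hst x (pvPopA_sub st sk a x h)
    have := ih (a :: (pvPopA st sk a).1) (pvPopA st sk a).2 hpre' hst'
    refine ⟨this.1, ?_⟩
    have hlen := pvPopA_len st sk a
    simp only [pvState]
    rw [this.2]
    simp only [List.length_cons]
    push_cast
    push_cast at hlen
    omega

-- the character c1 at the bottom of the stack is inert as long as every character the budget could reach is ≤ c1
theorem pvPopA_keep : ∀ (st : List Char) (sk : Int) (c c1 : Char),
    (¬ (0 < sk - st.length) ∨ c ≤ c1) →
    pvPopA (st ++ [c1]) sk c = ((pvPopA st sk c).1 ++ [c1], (pvPopA st sk c).2) := by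
  intro st
  induction st with
  | nil =>
    intro sk c c1 h
    have hc : ¬ (c1 < c ∧ 0 < sk) := by
      rintro ⟨h1, h2⟩
      rcases h with h | h
      · simp at h; omega
      · exact absurd h1 (not_lt.2 h)
    simp [pvPopA, if_neg hc]
  | cons a t ih =>
    intro sk c c1 h
    by_cases hc : a < c ∧ 0 < sk
    · simp only [List.cons_append, pvPopA, if_pos hc]
      refine ih (sk - 1) c c1 ?_
      rcases h with h | h
      · left; simp only [List.length_cons] at h ⊢; push_cast at h ⊢; omega
      · right; exact h
    · simp [pvPopA, if_neg hc]

theorem pvState_keep (c1 : Char) : ∀ (suf st : List Char) (sk : Int),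
    (∀ (m : Nat) (d : Char), (m : Int) < sk - st.length → suf[m]? = some d → d ≤ c1) →
    pvState (st ++ [c1]) sk suf = ((pvState st sk suf).1 ++ [c1], (pvState st sk suf).2) := by
  intro suf
  induction suf with
  | nil => intro st sk _; simp [pvState]
  | cons c cs ih =>
    intro st sk H
    have hpop : pvPopA (st ++ [c1]) sk c = ((pvPopA st sk c).1 ++ [c1], (pvPopA st sk c).2) := by
      apply pvPopA_keep
      by_cases h0 : (0:Int) < sk - st.length
      · exact Or.inr (H 0 c (by simpa using h0) (by simp))
      · exact Or.inl h0
    simp only [pvState, hpop]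
    rw [← List.cons_append]
    apply ih
    intro m d hm hd
    have hlen := pvPopA_len st sk c
    refine H (m + 1) d ?_ (by simpa using hd)
    simp only [List.length_cons] at hm
    push_cast at hm hlen ⊢
    omega

-- with a non-positive budget nothing is ever popped
theorem pvPopA_nopop (st : List Char) (sk : Int) (c : Char) (h : sk ≤ 0) :
    pvPopA st sk c = (st, sk) := by
  cases st with
  | nil => simp [pvPopA]
  | cons a t => simp [pvPopA]; omega

theorem pvState_nopop : ∀ (xs st : List Char) (sk : Int), sk ≤ 0 →
    pvState st sk xs = (xs.reverse ++ st, sk) := by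
  intro xs
  induction xs with
  | nil => intro st sk _; simp [pvState]
  | cons c cs ih => intro st sk h; simp [pvState, pvPopA_nopop st sk c h, ih _ _ h]

-- greedy with need = length is the identity
theorem pvChooseB_full : ∀ (s : List Char), pvChooseB s s.length = s := by
  intro s
  induction s with
  | nil => simp [pvChooseB]
  | cons c t ih =>
    simp only [List.length_cons, pvChooseB]
    rw [show ((t.length + 1 : Nat) : Int) - (t.length : Int) = ((1 : Nat) : Int) by push_cast; ring]
    rw [PySem.List.slice_to_natCast]
    simp [PySem.List.max?, PySem.List.index?_cons_self, ih]

-- MAIN LEMMA: for k ≤ |s|, the first k stack entries of A's pass equal B's greedy choice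
theorem pvMain : ∀ (k : Nat) (s : List Char), k ≤ s.length →
    (pvRunA [] ((s.length : Int) - (k : Int)) s).take k = pvChooseB s k := by
  intro k
  induction k with
  | zero => intro s _; simp [pvChooseB]
  | succ k ih =>
    intro s hk
    set n := s.length with hn
    have hnk : k < n := by omega
    -- the window and its leftmost maximum
    have hwcast : ((s.length : Int)) - (k : Int) = ((n - k : Nat) : Int) := by rw [← hn]; push_cast; omega
    set w := s.take (n - k) with hw
    have hwlen : w.length = n - k := by rw [hw]; rw [List.length_take]; omega
    have hwne : w ≠ [] := by
      intro h; rw [h] at hwlen; simp at hwlen; omega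
    obtain ⟨c1, hc1⟩ : ∃ c1, PySem.List.max? w (fun x => x) = some c1 := by
      cases hmax : PySem.List.max? w (fun x => x) with
      | none => exact absurd ((PySem.List.max?_eq_none_iff _ _).1 hmax) hwne
      | some c1 => exact ⟨c1, rfl⟩
    have hc1mem : c1 ∈ w := PySem.List.max?_mem hc1
    have hc1max : ∀ y ∈ w, y ≤ c1 := PySem.List.max?_isMax hc1
    obtain ⟨p, hp⟩ : ∃ p, PySem.List.index? w c1 = some p := by
      cases hidx : PySem.List.index? w c1 with
      | none => exact absurd ((PySem.List.index?_eq_none_iff _ _).1 hidx) (by simpa using hc1mem)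
      | some p => exact ⟨p, rfl⟩
    obtain ⟨hplt, hwp, hpre⟩ := PySem.List.getElem_of_index?_eq_some hp
    rw [hwlen] at hplt
    -- decompose s = pre ++ c1 :: suf
    have hpn : p < n := by omega
    have hsp : s[p]'(by omega) = c1 := by
      rw [← hwp]; simp [hw, List.getElem_take]
    set pre := s.take p with hpredef
    set suf := s.drop (p + 1) with hsufdef
    have hsplit : s = pre ++ c1 :: suf := by
      rw [hpredef, hsufdef, ← hsp, List.getElem_cons_drop, List.take_append_drop]
    have hprelen : pre.length = p := by rw [hpredef, List.length_take]; omega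
    have hsuflen : suf.length = n - (p + 1) := by rw [hsufdef, List.length_drop, hn]
    -- every index j < n - k of s lies in the window, hence s[j] ≤ c1; before p it is ≠ c1 hence < c1
    have hwin : ∀ (j : Nat) (hj : j < n - k), s[j]'(by omega) ≤ c1 := by
      intro j hj
      have : w[j]'(by omega) = s[j]'(by omega) := by simp [hw, List.getElem_take]
      rw [← this]
      exact hc1max _ (List.getElem_mem _)
    have hpresmall : ∀ x ∈ pre, x < c1 := by
      intro x hx
      rw [hpredef] at hx
      obtain ⟨j, hj, rfl⟩ := List.getElem_of_mem hx
      have hjp : j < p := by rw [hprelen] at hj; exact hj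
      have hgs : pre[j]'hj = s[j]'(by omega) := by simp [hpredef, List.getElem_take]
      have hne : pre[j]'hj ≠ c1 := by
        rw [hgs, ← (by simp [hw, List.getElem_take] : w[j]'(by omega) = s[j]'(by omega))]
        exact hpre j (by omega)
      have hle : pre[j]'hj ≤ c1 := by rw [hgs]; exact hwin j (by omega)
      exact lt_of_le_of_ne hle hne
    -- run A over pre: stack all < c1, with the length/skip invariant
    set B0 : Int := (n : Int) - ((k : Int) + 1) with hB0
    have hpB0 : (p : Int) ≤ B0 := by rw [hB0]; push_cast; omega
    obtain ⟨hst1small, hst1len⟩ := pvState_small c1 pre [] B0 hpresmall (by simp)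
    set st1 := (pvState [] B0 pre).1
    set sk1 := (pvState [] B0 pre).2
    have hsk1 : sk1 = (st1.length : Int) + B0 - p := by
      simp only [List.length_nil, hprelen] at hst1len; push_cast at hst1len ⊢; omega
    -- c1 pops the whole stack
    have hpop1 : pvPopA st1 sk1 c1 = ([], B0 - p) := by
      rw [pvPopA_all st1 sk1 c1 hst1small (by omega)]
      congr 1
      omega
    -- c1 is never popped afterwards
    have hkeep : pvState [c1] (B0 - p) suf
        = ((pvState [] (B0 - p) suf).1 ++ [c1], (pvState [] (B0 - p) suf).2) := by
      have := pvState_keep c1 suf [] (B0 - p) ?_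
      · simpa using this
      · intro m d hm hd
        simp only [List.length_nil, Nat.cast_zero, sub_zero] at hm
        have hmn : p + 1 + m < n - k := by rw [hB0] at hm; push_cast at hm; omega
        have : suf[m]? = some (s[p + 1 + m]'(by omega)) := by
          rw [hsufdef]
          simp [List.getElem?_drop, List.getElem?_eq_getElem (by omega : p + 1 + m < s.length)]
        rw [this] at hd
        injection hd with hd
        rw [← hd]
        exact hwin _ hmn
    -- assemble A's final stack
    have hstate : pvState [] B0 s
        = ((pvState [] (B0 - p) suf).1 ++ [c1], (pvState [] (B0 - p) suf).2) := by
      conv_lhs => rw [hsplit]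
      rw [pvState_append]
      show pvState st1 sk1 (c1 :: suf) = _
      simp only [pvState, hpop1]
      exact hkeep
    have hA : pvRunA [] B0 s = c1 :: pvRunA [] (B0 - p) suf := by
      rw [pvRunA_eq_state, pvRunA_eq_state, hstate]
      simp
    -- B's step
    have hBstep : pvChooseB s (k + 1) = c1 :: pvChooseB suf k := by
      rw [pvChooseB]
      simp only [hwcast, PySem.List.slice_to_natCast, ← hw, hc1, hp, Option.getD_some, ← hsufdef]
    rw [hBstep]
    rw [show (n : Int) - ((k + 1 : Nat) : Int) = B0 from by rw [hB0]; push_cast; ring]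
    rw [hA]
    simp only [List.take_succ_cons]
    congr 1
    have hBp : B0 - p = (suf.length : Int) - (k : Int) := by
      rw [hB0, hsuflen]; push_cast; omega
    rw [hBp]
    exact ih suf (by omega)

-- per-bank equality for 1 ≤ k
theorem pvBank_eq (bank : String) (k : Int) (hk : 1 ≤ k) : pvBankA bank k = pvBankB bank k := by
  unfold pvBankA pvBankB
  generalize bank.toList = s
  by_cases hkn : k ≤ (s.length : Int)
  · -- 1 ≤ k ≤ n : the main lemma
    have hknat : k = (k.toNat : Int) := by omega
    have hmin : min k (s.length : Int) = k := min_eq_left hkn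
    rw [hmin, hknat, PySem.List.slice_to _ (Int.natCast_nonneg _)]
    simp only [Int.toNat_natCast]
    exact congrArg (fun l => (PySem.Int.ofChars? l).getD 0) (pvMain k.toNat s (by omega))
  · -- k > n : no pops on the A side, the greedy takes everything on the B side
    have hsk : (s.length : Int) - k ≤ 0 := by omega
    have hA : pvRunA [] ((s.length : Int) - k) s = s := by
      rw [pvRunA_eq_state, pvState_nopop s [] _ hsk]
      simp
    have hmin : min k (s.length : Int) = (s.length : Int) := min_eq_right (by omega)
    rw [hA, PySem.List.slice_to _ (by omega : (0:Int) ≤ k), hmin]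
    simp only [Int.toNat_natCast]
    rw [pvChooseB_full, List.take_of_length_le (by omega)]

-- ===== VERDICT (by name: the statement is the Claim_ definition above) =====
theorem get_highest_joltage_spec : Claim_equal_get_highest_joltage := by
  intro banks k _ hpre
  unfold Spec_get_highest_joltage get_highest_joltage get_highest_joltage_alt
  rcases hpre with rfl | hpre
  · rfl
  refine PySem.List.foldl_congr_mem banks _ _ 0 ?_
  intro acc bank _
  show acc + pvBankA bank k = acc + pvBankB bank k
  rw [pvBank_eq bank k hpre.1]
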